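-- pv_equiv track=rewrite | github.com/yugokeno/INF1x1-weekly-tasks | 41/stocks_fenetres.py | calculate_stock
-- ===== SOURCE A (Python) =====
-- def calculate_stock(n):
--     stock = 1024
--     stocks = [stock]
--     for week in range(2, n + 2):
--         stock -= (20 + week)
--         if week % 4 == 0:
--             stock += 500
--         stocks.append(stock)
--     return stocks
-- ===== SOURCE B (Python) =====
-- def calculate_stock(n):
--     # closed form per week: no running accumulator
--     return [1024] + [1024 - (20 * (w - 1) + (w * (w + 1) // 2 - 1)) + 500 * (w // 4)
--                      for w in range(2, n + 2)]
-- ===== Notes on version B (the rewrite author's own statement) =====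
-- stated objective: simpler
-- what changed: Replaced the accumulating loop (running stock variable mutated each week) by a closed-form per-element formula: each weekly value is computed independently as 1024 - (20*(w-1) + (w*(w+1)//2 - 1)) + 500*(w//4), built with a list comprehension.
import Mathlib
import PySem

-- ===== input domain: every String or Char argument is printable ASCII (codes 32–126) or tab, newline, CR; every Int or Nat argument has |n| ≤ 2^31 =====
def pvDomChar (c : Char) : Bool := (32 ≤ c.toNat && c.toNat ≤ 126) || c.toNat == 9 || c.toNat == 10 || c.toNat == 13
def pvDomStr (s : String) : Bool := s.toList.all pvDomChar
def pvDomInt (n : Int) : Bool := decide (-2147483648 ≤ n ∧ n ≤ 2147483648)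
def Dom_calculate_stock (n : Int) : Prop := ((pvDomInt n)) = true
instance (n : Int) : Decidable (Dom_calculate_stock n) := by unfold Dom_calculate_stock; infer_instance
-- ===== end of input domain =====

-- B replaces A's accumulating loop by an independent closed-form formula per week (objective: simpler).

-- ===== PORT A =====
def calculate_stock (n : Int) : List Int :=
  let init : Int × List Int := (1024, [1024])
  let r := (PySem.List.pyRange 2 (n + 2) 1).foldl
    (fun (st : Int × List Int) week =>
      let stock := st.1 - (20 + week)
      let stock := if PySem.Int.mod week 4 = 0 then stock + 500 else stock
      (stock, st.2 ++ [stock])) init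
  r.2

-- ===== PORT B =====
def pvFormula (w : Int) : Int :=
  1024 - (20 * (w - 1) + (PySem.Int.floordiv (w * (w + 1)) 2 - 1)) + 500 * PySem.Int.floordiv w 4

def calculate_stock_alt (n : Int) : List Int :=
  [1024] ++ (PySem.List.pyRange 2 (n + 2) 1).map pvFormula

-- ===== PRECONDITION & SPEC =====
def Spec_calculate_stock (n : Int) (out : List Int) : Prop := out = calculate_stock_alt n
instance (n : Int) (out : List Int) : Decidable (Spec_calculate_stock n out) := by unfold Spec_calculate_stock; infer_instance

-- ===== CLAIM (what is proved, stated in full; the proofs are below) =====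
def Claim_equal_calculate_stock : Prop := ∀ (n : Int), Dom_calculate_stock n → Spec_calculate_stock n (calculate_stock n)

-- ===== LEMMAS AND PROOFS =====

-- one loop step applied to the closed form advances it by one week
theorem pvFormula_step (w : Int) :
    (if PySem.Int.mod (w + 1) 4 = 0 then pvFormula w - (20 + (w + 1)) + 500
     else pvFormula w - (20 + (w + 1))) = pvFormula (w + 1) := by
  unfold pvFormula
  rw [PySem.Int.mod_eq_emod_of_pos (by norm_num : (0:Int) < 4),
      PySem.Int.floordiv_eq_ediv_of_pos (by norm_num : (0:Int) < 2),
      PySem.Int.floordiv_eq_ediv_of_pos (by norm_num : (0:Int) < 4),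
      PySem.Int.floordiv_eq_ediv_of_pos (by norm_num : (0:Int) < 2),
      PySem.Int.floordiv_eq_ediv_of_pos (by norm_num : (0:Int) < 4)]
  have hmul : (w + 1) * (w + 1 + 1) = w * (w + 1) + (w + 1) * 2 := by ring
  rw [hmul, Int.add_mul_ediv_right _ _ (by norm_num : (2:Int) ≠ 0)]
  generalize w * (w + 1) / 2 = d
  split_ifs with h <;> omega

-- loop invariant: the fold over pyRange (w+1) (w+1+k) 1 starting from the closed form at w
theorem pv_loop (k : Nat) : ∀ (w : Int), 1 ≤ w → ∀ (acc : List Int),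
    (PySem.List.pyRange (w + 1) (w + 1 + k) 1).foldl
      (fun (st : Int × List Int) week =>
        (if PySem.Int.mod week 4 = 0 then st.1 - (20 + week) + 500 else st.1 - (20 + week),
         st.2 ++ [if PySem.Int.mod week 4 = 0 then st.1 - (20 + week) + 500 else st.1 - (20 + week)]))
      (pvFormula w, acc)
    = (pvFormula (w + k), acc ++ (PySem.List.pyRange (w + 1) (w + 1 + k) 1).map pvFormula) := by
  induction k with
  | zero =>
    intro w hw acc
    rw [PySem.List.pyRange_one_eq_nil (by omega)]
    simp
  | succ k ih =>
    intro w hw acc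
    rw [PySem.List.pyRange_one_cons (by omega : w + 1 < w + 1 + (k + 1 : Nat))]
    simp only [List.foldl_cons, List.map_cons]
    rw [pvFormula_step w]
    have h1 : w + 1 + ((k + 1 : Nat) : Int) = (w + 1) + 1 + (k : Nat) := by push_cast; ring
    rw [h1, ih (w + 1) (by omega) (acc ++ [pvFormula (w + 1)])]
    have h2 : (w + 1) + ((k : Nat) : Int) = w + ((k + 1 : Nat) : Int) := by push_cast; ring
    rw [h2]
    simp

-- ===== VERDICT (by name: the statement is the Claim_ definition above) =====
theorem calculate_stock_spec : Claim_equal_calculate_stock := by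
  intro n _
  unfold Spec_calculate_stock calculate_stock calculate_stock_alt
  simp only []
  by_cases hn : n ≤ 0
  · rw [PySem.List.pyRange_one_eq_nil (by omega)]
    simp
  · have hk : n + 2 = 1 + 1 + ((n.toNat : Nat) : Int) := by omega
    have h1024 : (1024 : Int) = pvFormula 1 := by decide
    rw [hk, h1024]
    rw [show ((2:Int) = 1 + 1) from by norm_num] -- align range lower bound with pv_loop's w+1
    rw [pv_loop n.toNat 1 (by omega) [pvFormula 1]]
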